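-- pv_equiv track=rewrite | github.com/srikanth-rl/Programing-Languages | flames.py | flames
-- ===== SOURCE A (Python) =====
-- def flames(name1, name2):
--     name1 = name1.lower().replace(" ", "")
--     name2 = name2.lower().replace(" ", "")
--     letters = {}
--     for letter in name1 + name2:
--         if letter in letters:
--             letters[letter] += 1
--         else:
--             letters[letter] = 1
--     common_letters = 0
--     for letter in "flames":
--         if letter in letters:
--             common_letters += letters[letter]
--             del letters[letter]
--     remaining_letters = len(name1) + len(name2) - 2*common_letters
--     relationships = ["Friends", "Lovers", "Affectionate", "Marriage", "Enemies", "Siblings"]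
--     while len(relationships) > 1:
--         index = (remaining_letters % len(relationships)) - 1
--         if index < 0:
--             index = len(relationships) - 1
--         relationships = relationships[index+1:] + relationships[:index]
--     return relationships[0]
-- ===== SOURCE B (Python) =====
-- def flames(name1, name2):
--     name1 = name1.lower().replace(" ", "")
--     name2 = name2.lower().replace(" ", "")
--     combined = name1 + name2
--     common = sum(combined.count(ch) for ch in "flames")
--     remaining = len(name1) + len(name2) - 2 * common
--     relationships = ["Friends", "Lovers", "Affectionate", "Marriage", "Enemies", "Siblings"]
--     j = 0
--     for i in range(2, 7):
--         j = (j + remaining) % i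
--     return relationships[j]
-- ===== Notes on version B (the rewrite author's own statement) =====
-- stated objective: faster
-- what changed: Replaces the while-loop that simulates the circular elimination by list slicing with the Josephus modular recurrence j=(j+remaining)%i for i in 2..6, and replaces the per-character letter-count dictionary loop (build, then sum-and-delete over 'flames') with a direct sum of six str.count calls.
import Mathlib
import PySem

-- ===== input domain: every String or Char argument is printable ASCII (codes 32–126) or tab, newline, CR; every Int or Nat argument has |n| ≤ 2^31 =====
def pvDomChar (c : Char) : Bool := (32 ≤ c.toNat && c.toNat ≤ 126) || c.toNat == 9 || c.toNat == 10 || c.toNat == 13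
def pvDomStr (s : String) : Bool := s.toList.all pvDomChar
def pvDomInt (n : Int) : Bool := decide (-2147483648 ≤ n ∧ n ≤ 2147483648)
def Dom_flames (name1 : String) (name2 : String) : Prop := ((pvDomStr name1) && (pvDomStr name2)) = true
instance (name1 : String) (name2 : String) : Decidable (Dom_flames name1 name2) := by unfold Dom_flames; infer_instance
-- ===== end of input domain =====

-- B replaces A's circular-elimination simulation of the FLAMES list by the Josephus modular
-- recurrence (j := (j + remaining) % i for i = 2..6) and the counter dictionary by direct
-- character counts; objective: simpler. Both programs are pure (no mutation).

-- ===== PORT A =====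
-- the 'while len(relationships) > 1' loop; fuel (initially the list length) only makes the
-- recursion structural — with the initial call it is never exhausted before the loop exits
def flamesLoop : Nat → Int → List String → List String
  | 0, _, rel => rel
  | fuel + 1, r, rel =>
    if 1 < rel.length then
      let index0 : Int := PySem.Int.mod r (rel.length : Int) - 1
      let index : Int := if index0 < 0 then (rel.length : Int) - 1 else index0
      flamesLoop fuel r (PySem.List.slice rel (some (index + 1)) none ++ PySem.List.slice rel (some 0) (some index))
    else rel

def flames (name1 : String) (name2 : String) : String :=
  let n1 := PySem.Str.replace (PySem.Str.lower name1) " " ""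
  let n2 := PySem.Str.replace (PySem.Str.lower name2) " " ""
  -- 'for letter in name1 + name2' iterates the characters of the concatenation
  let letters := (n1.toList ++ n2.toList).foldl
      (fun (d : PySem.Dict Char Int) letter =>
        if d.contains letter then d.insert letter (d.getD letter 0 + 1) else d.insert letter 1)
      PySem.Dict.empty
  -- 'for letter in "flames"': accumulate common_letters and delete the key
  let common := ("flames".toList.foldl
      (fun (st : Int × PySem.Dict Char Int) letter =>
        if st.2.contains letter then (st.1 + st.2.getD letter 0, st.2.erase letter) else st)
      (0, letters)).1
  let remaining : Int := PySem.Str.len n1 + PySem.Str.len n2 - 2 * common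
  let rels := ["Friends", "Lovers", "Affectionate", "Marriage", "Enemies", "Siblings"]
  -- relationships[0]; the loop always ends with a singleton list, so index 0 is in range
  PySem.List.pyGetD (flamesLoop rels.length remaining rels) 0 ""

-- ===== PORT B =====
def flames_alt (name1 : String) (name2 : String) : String :=
  let n1 := PySem.Str.replace (PySem.Str.lower name1) " " ""
  let n2 := PySem.Str.replace (PySem.Str.lower name2) " " ""
  -- combined = name1 + name2; combined.count(ch) for a 1-character ch is the character count
  let combined := n1.toList ++ n2.toList
  let common : Int := ("flames".toList.map (fun ch => (combined.count ch : Int))).sum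
  let remaining : Int := PySem.Str.len n1 + PySem.Str.len n2 - 2 * common
  let rels := ["Friends", "Lovers", "Affectionate", "Marriage", "Enemies", "Siblings"]
  let j := (PySem.List.pyRange 2 7 1).foldl (fun j i => PySem.Int.mod (j + remaining) i) 0
  -- j = (...) % 6 is always in [0, 6), so relationships[j] is in range
  PySem.List.pyGetD rels j ""

-- ===== PRECONDITION & SPEC =====
def Spec_flames (name1 : String) (name2 : String) (out : String) : Prop := out = flames_alt name1 name2
instance (name1 : String) (name2 : String) (out : String) : Decidable (Spec_flames name1 name2 out) := by unfold Spec_flames; infer_instance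

-- ===== CLAIM (what is proved, stated in full; the proofs are below) =====
def Claim_equal_flames : Prop := ∀ (name1 : String) (name2 : String), Dom_flames name1 name2 → Spec_flames name1 name2 (flames name1 name2)

-- ===== LEMMAS AND PROOFS =====

-- A's branched counter loop is the unconditional 'd[x] = d.get(x, 0) + 1' loop, i.e. Counter
theorem flames_counter_eq (l : List Char) :
    l.foldl (fun (d : PySem.Dict Char Int) letter =>
        if d.contains letter then d.insert letter (d.getD letter 0 + 1) else d.insert letter 1)
      PySem.Dict.empty = PySem.Dict.counter l := by
  rw [PySem.List.foldl_congr_mem _ _ (fun d x => d.insert x (d.getD x 0 + 1)) _ ?_,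
    PySem.Dict.foldl_insert_getD_add_one_eq_counter]
  intro d x _
  by_cases h : d.contains x
  · simp [h]
  · simp only [Bool.not_eq_true] at h
    simp [h, PySem.Dict.getD_of_not_contains _ _ h]

-- erasing one key does not change the lookup of another (A deletes each 'flames' letter)
theorem flames_getD_erase_of_ne (d : PySem.Dict Char Int) (k k' : Char) (h : k' ≠ k) :
    (d.erase k).getD k' 0 = d.getD k' 0 := by
  simp only [PySem.Dict.getD, PySem.Dict.get?, PySem.Dict.erase]
  have : List.find? (fun p => p.1 == k') (d.items.filter (fun p => !p.1 == k))
      = List.find? (fun p => p.1 == k') d.items := by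
    induction d.items with
    | nil => rfl
    | cons p t ih =>
      by_cases hp : p.1 = k'
      · have hq : ¬ p.1 = k := by rw [hp]; exact h
        rw [List.filter_cons_of_pos (by simp [hq]), List.find?_cons_of_pos (by simp [hp]),
          List.find?_cons_of_pos (by simp [hp])]
      · by_cases hq : p.1 = k
        · rw [List.filter_cons_of_neg (by simp [hq]), List.find?_cons_of_neg (by simp [hp]), ih]
        · rw [List.filter_cons_of_pos (by simp [hq]), List.find?_cons_of_neg (by simp [hp]),
            List.find?_cons_of_neg (by simp [hp]), ih]
  rw [this]

-- A's 'for letter in "flames"' fold sums the current counts (keys are pairwise distinct)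
theorem flames_common_fold (cs : List Char) (hnd : cs.Nodup) :
    ∀ (d : PySem.Dict Char Int) (acc : Int),
      (cs.foldl (fun (st : Int × PySem.Dict Char Int) letter =>
          if st.2.contains letter then (st.1 + st.2.getD letter 0, st.2.erase letter) else st)
        (acc, d)).1 = acc + (cs.map (fun c => d.getD c 0)).sum := by
  induction cs with
  | nil => intro d acc; simp
  | cons c t ih =>
    intro d acc
    obtain ⟨hc, hndt⟩ := List.nodup_cons.mp hnd
    simp only [List.foldl_cons, List.map_cons, List.sum_cons]
    by_cases h : d.contains c
    · rw [if_pos h, ih hndt]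
      have : (t.map (fun c' => (d.erase c).getD c' 0)) = t.map (fun c' => d.getD c' 0) :=
        List.map_congr_left (fun x hx => flames_getD_erase_of_ne d c x (fun e => hc (e ▸ hx)))
      rw [this]; ring
    · rw [if_neg h, ih hndt]
      simp only [Bool.not_eq_true] at h
      rw [PySem.Dict.getD_of_not_contains _ _ h]
      ring

-- the Josephus fold written out as nested Python-mods (all divisors positive ⇒ emod)
theorem flames_jB_eq (r : Int) :
    (PySem.List.pyRange 2 7 1).foldl (fun j i => PySem.Int.mod (j + r) i) 0
      = (((((0 + r) % 2 + r) % 3 + r) % 4 + r) % 5 + r) % 6 := by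
  have hr : PySem.List.pyRange 2 7 1 = [2, 3, 4, 5, 6] := by decide
  rw [hr]
  simp only [List.foldl_cons, List.foldl_nil,
    PySem.Int.mod_eq_emod_of_pos (by norm_num : (0:Int) < 2),
    PySem.Int.mod_eq_emod_of_pos (by norm_num : (0:Int) < 3),
    PySem.Int.mod_eq_emod_of_pos (by norm_num : (0:Int) < 4),
    PySem.Int.mod_eq_emod_of_pos (by norm_num : (0:Int) < 5),
    PySem.Int.mod_eq_emod_of_pos (by norm_num : (0:Int) < 6)]

-- A's elimination loop only sees r through r % len for len ∈ [2,6]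
theorem flamesLoop_congr (fuel : Nat) (r r' : Int)
    (h : ∀ n : Nat, 2 ≤ n → n ≤ 6 → PySem.Int.mod r (n : Int) = PySem.Int.mod r' (n : Int)) :
    ∀ rel : List String, rel.length ≤ 6 → flamesLoop fuel r rel = flamesLoop fuel r' rel := by
  induction fuel with
  | zero => intro rel _; rfl
  | succ fuel ih =>
    intro rel hlen
    by_cases hl : 1 < rel.length
    · have hmod : PySem.Int.mod r (rel.length : Int) = PySem.Int.mod r' (rel.length : Int) :=
        h rel.length hl hlen
      have hpos : (0 : Int) < (rel.length : Int) := by exact_mod_cast Nat.lt_of_lt_of_le Nat.zero_lt_one (le_of_lt hl)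
      have hmnn := PySem.Int.mod_nonneg r hpos
      have hmlt := PySem.Int.mod_lt r hpos
      simp only [flamesLoop, if_pos hl, hmod]
      apply ih
      -- the new list has length (old length - 1)
      set m := PySem.Int.mod r' (rel.length : Int) with hm
      rw [← hmod] at *
      by_cases hz : PySem.Int.mod r (rel.length : Int) - 1 < 0
      · -- index = len - 1 : drop len ++ take (len-1)
        rw [if_pos hz]
        have h1 : ((rel.length : Int) - 1 + 1) = ((rel.length : Nat) : Int) := by ring
        rw [h1, PySem.List.slice_from_natCast, PySem.List.slice_zero_start]
        have h2 : ((rel.length : Int) - 1) = (((rel.length - 1 : Nat)) : Int) := by omega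
        rw [h2, PySem.List.slice_to_natCast]
        simp only [List.length_append, List.length_drop, List.length_take]
        omega
      · rw [if_neg hz]
        have h0 : 0 ≤ PySem.Int.mod r (rel.length : Int) - 1 + 1 := by omega
        rw [PySem.List.slice_from _ h0, PySem.List.slice_zero_start,
          PySem.List.slice_to _ (by omega)]
        simp only [List.length_append, List.length_drop, List.length_take]
        omega
    · simp only [flamesLoop, if_neg hl]

-- the fixed relationship list
def flamesRels : List String := ["Friends", "Lovers", "Affectionate", "Marriage", "Enemies", "Siblings"]

-- the 60 residues: A's simulation and B's Josephus recurrence agree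
theorem flames_resid (s : Int) (h0 : 0 ≤ s) (h1 : s < 60) :
    PySem.List.pyGetD (flamesLoop flamesRels.length s flamesRels) 0 ""
      = PySem.List.pyGetD flamesRels
          ((PySem.List.pyRange 2 7 1).foldl (fun j i => PySem.Int.mod (j + s) i) 0) "" := by
  interval_cases s <;> decide

-- both tails are 60-periodic in remaining, so the residue lemma settles every Int
theorem flames_tail_eq (r : Int) :
    PySem.List.pyGetD (flamesLoop flamesRels.length r flamesRels) 0 ""
      = PySem.List.pyGetD flamesRels
          ((PySem.List.pyRange 2 7 1).foldl (fun j i => PySem.Int.mod (j + r) i) 0) "" := by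
  set s : Int := r % 60 with hs
  have hs0 : 0 ≤ s := Int.emod_nonneg r (by norm_num)
  have hs1 : s < 60 := Int.emod_lt_of_pos r (by norm_num)
  have hA : flamesLoop flamesRels.length r flamesRels = flamesLoop flamesRels.length s flamesRels := by
    apply flamesLoop_congr _ _ _ ?_ _ (by decide)
    intro n hn2 hn6
    interval_cases n <;>
      rw [PySem.Int.mod_eq_emod_of_pos (by norm_num), PySem.Int.mod_eq_emod_of_pos (by norm_num)] <;>
      omega
  have hB : (PySem.List.pyRange 2 7 1).foldl (fun j i => PySem.Int.mod (j + r) i) 0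
      = (PySem.List.pyRange 2 7 1).foldl (fun j i => PySem.Int.mod (j + s) i) 0 := by
    rw [flames_jB_eq, flames_jB_eq]
    have e1 : (0 + r) % 2 = (0 + s) % 2 := by omega
    have e2 : ((0 + r) % 2 + r) % 3 = ((0 + s) % 2 + s) % 3 := by omega
    have e3 : (((0 + r) % 2 + r) % 3 + r) % 4 = (((0 + s) % 2 + s) % 3 + s) % 4 := by omega
    have e4 : ((((0 + r) % 2 + r) % 3 + r) % 4 + r) % 5 = ((((0 + s) % 2 + s) % 3 + s) % 4 + s) % 5 := by omega
    omega
  rw [hA, hB, flames_resid s hs0 hs1]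

-- ===== VERDICT (by name: the statement is the Claim_ definition above) =====
theorem flames_spec : Claim_equal_flames := by
  intro name1 name2 _
  unfold Spec_flames flames flames_alt
  simp only [flames_counter_eq, flames_common_fold "flames".toList (by decide),
    PySem.Dict.getD_counter, zero_add]
  exact flames_tail_eq _
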